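-- pv_equiv track=rewrite | github.com/Artems01/SII_labs | main_hierarchical.py | agglomerative_clustering
-- ===== SOURCE A (Python) =====
-- def agglomerative_clustering(k, matrix, n):
--     clusters = [[i] for i in range(n)]
--
--     while len(clusters) > k:
--         best_dist = float('inf')
--         pair = (0, 1)
--
--         for i in range(len(clusters)):
--             for j in range(i + 1, len(clusters)):
--                 current = max(matrix[a][b] for a in clusters[i] for b in clusters[j])
--
--                 if current < best_dist:
--                     best_dist = current
--                     pair = (i, j)
--
--         i, j = pair
--         clusters[i].extend(clusters[j])
--         clusters.pop(j)
--
--     return clusters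
-- ===== SOURCE B (Python) =====
-- def agglomerative_clustering(k, matrix, n):
--     members = [[i] for i in range(n)]
--     if len(members) <= k:
--         return members
--     D = [[matrix[a][b] for b in range(n)] for a in range(n)]
--     while len(members) > k:
--         best, i, j = None, 0, 1
--         for p in range(len(members)):
--             for q in range(p + 1, len(members)):
--                 if best is None or D[p][q] < best:
--                     best, i, j = D[p][q], p, q
--
--         def merged(p, q):
--             if p == i and q != i:
--                 return max(D[i][q], D[j][q])
--             if q == i and p != i:
--                 return max(D[p][i], D[p][j])
--             return D[p][q]
--
--         keep = [t for t in range(len(D)) if t != j]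
--         D = [[merged(p, q) for q in keep] for p in keep]
--         members[i] += members[j]
--         del members[j]
--     return members
-- ===== Notes on version B (the rewrite author's own statement) =====
-- stated objective: alternative
-- what changed: B maintains a complete-linkage cluster-distance matrix updated by the Lance-Williams max rule at each merge (returning early when no merging is needed), instead of A's recomputation of the max over all member point-pairs for every cluster pair in every iteration.
-- outside the precondition, e.g. on agglomerative_clustering(1, [[0, 5]], 2): A returns [[0, 1]], B raises IndexError
import Mathlib
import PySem

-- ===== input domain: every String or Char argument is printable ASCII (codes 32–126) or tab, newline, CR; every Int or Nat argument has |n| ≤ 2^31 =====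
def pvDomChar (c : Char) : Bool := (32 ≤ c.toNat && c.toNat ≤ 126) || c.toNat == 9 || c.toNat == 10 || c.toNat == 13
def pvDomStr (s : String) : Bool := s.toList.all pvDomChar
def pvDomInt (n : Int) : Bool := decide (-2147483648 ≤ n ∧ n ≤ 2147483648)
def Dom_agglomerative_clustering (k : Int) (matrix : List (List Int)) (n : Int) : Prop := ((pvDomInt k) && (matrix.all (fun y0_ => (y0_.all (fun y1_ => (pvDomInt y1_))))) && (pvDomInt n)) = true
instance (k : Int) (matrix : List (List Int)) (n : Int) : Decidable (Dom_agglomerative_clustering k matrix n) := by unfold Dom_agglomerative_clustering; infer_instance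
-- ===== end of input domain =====

-- B replaces A's per-iteration recomputation of complete-linkage distances over all member
-- point-pairs by a cluster-distance matrix updated with the Lance-Williams max rule (objective:
-- alternative algorithm/data structure; not measurably faster at the tested sizes).


-- ===== PORT A =====
-- matrix[a][b] for indices that Pre_ guarantees to be in range (cluster members are 0..n-1,
-- Pre_ demands an n×n matrix), so the total getter is exact there.
def pvMget (matrix : List (List Int)) (a b : Int) : Int :=
  (matrix.getD a.toNat []).getD b.toNat 0

-- max(matrix[a][b] for a in clusters[i] for b in clusters[j]); the generator is nonempty on
-- every input Pre_ admits, so the `.getD 0` default of Python's ValueError branch is never taken.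
def pvCross (matrix : List (List Int)) (ci cj : List Int) : Int :=
  (PySem.List.max? (ci.flatMap fun a => cj.map fun b => pvMget matrix a b) (fun y => y)).getD 0

-- the double `for i / for j` scan for the pair of clusters at minimal complete-linkage distance;
-- best_dist = none plays float('inf') (any Int is < it)
def pvSelectA (matrix : List (List Int)) (cs : List (List Int)) : Option Int × Int × Int :=
  (PySem.List.pyRange 0 (cs.length : Int) 1).foldl (fun st i =>
    (PySem.List.pyRange (i + 1) (cs.length : Int) 1).foldl (fun st j =>
      let cur := pvCross matrix (cs.getD i.toNat []) (cs.getD j.toNat [])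
      match st.1 with
      | none => (some cur, i, j)
      | some b => if cur < b then (some cur, i, j) else st) st) (none, 0, 1)

-- clusters[i].extend(clusters[j]); clusters.pop(j)
def pvStepA (matrix : List (List Int)) (cs : List (List Int)) : List (List Int) :=
  let s := pvSelectA matrix cs
  let i := s.2.1
  let j := s.2.2
  (cs.set i.toNat ((cs.getD i.toNat []) ++ (cs.getD j.toNat []))).eraseIdx j.toNat

-- the while loop, with fuel n.toNat (each merge removes one cluster, so n.toNat steps suffice
-- on every input Pre_ admits)
def pvLoopA (matrix : List (List Int)) (k : Int) : Nat → List (List Int) → List (List Int)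
  | 0, cs => cs
  | f + 1, cs => if k < (cs.length : Int) then pvLoopA matrix k f (pvStepA matrix cs) else cs

def agglomerative_clustering (k : Int) (matrix : List (List Int)) (n : Int) : List (List Int) :=
  pvLoopA matrix k n.toNat ((PySem.List.pyRange 0 n 1).map (fun i => [i]))

-- ===== PORT B =====
-- the double `for p / for q` scan of Source B, reading the maintained distance matrix D
def pvSelectB (D : List (List Int)) (L : Int) : Option Int × Int × Int :=
  (PySem.List.pyRange 0 L 1).foldl (fun st p =>
    (PySem.List.pyRange (p + 1) L 1).foldl (fun st q =>
      let cur := (D.getD p.toNat []).getD q.toNat 0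
      match st.1 with
      | none => (some cur, p, q)
      | some b => if cur < b then (some cur, p, q) else st) st) (none, 0, 1)

-- merged(p, q) of Source B: the Lance-Williams complete-linkage (max) update
def pvMerged (D : List (List Int)) (i j p q : Int) : Int :=
  if p = i ∧ q ≠ i then
    max ((D.getD i.toNat []).getD q.toNat 0) ((D.getD j.toNat []).getD q.toNat 0)
  else if q = i ∧ p ≠ i then
    max ((D.getD p.toNat []).getD i.toNat 0) ((D.getD p.toNat []).getD j.toNat 0)
  else (D.getD p.toNat []).getD q.toNat 0

-- one iteration of Source B's while loop: select, rebuild D over the kept indices, merge members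
def pvStepB (ms D : List (List Int)) : List (List Int) × List (List Int) :=
  let s := pvSelectB D (ms.length : Int)
  let i := s.2.1
  let j := s.2.2
  let keep := (PySem.List.pyRange 0 (D.length : Int) 1).filter (fun t => t != j)
  let D' := keep.map (fun p => keep.map (fun q => pvMerged D i j p q))
  let ms' := (ms.set i.toNat ((ms.getD i.toNat []) ++ (ms.getD j.toNat []))).eraseIdx j.toNat
  (ms', D')

def pvLoopB (k : Int) : Nat → List (List Int) → List (List Int) → List (List Int)
  | 0, ms, _ => ms
  | f + 1, ms, D =>
      if k < (ms.length : Int) then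
        let s := pvStepB ms D
        pvLoopB k f s.1 s.2
      else ms

def agglomerative_clustering_alt (k : Int) (matrix : List (List Int)) (n : Int) : List (List Int) :=
  let members := (PySem.List.pyRange 0 n 1).map (fun i => [i])
  if (members.length : Int) ≤ k then members
  else
    let D := (PySem.List.pyRange 0 n 1).map (fun a => (PySem.List.pyRange 0 n 1).map (fun b => pvMget matrix a b))
    pvLoopB k n.toNat members D

-- ===== PRECONDITION & SPEC =====
-- Exactly where the Python A returns: the loop never reaches a state with one cluster and k ≤ 0
-- (there A's clusters[j] raises IndexError), and the matrix is big enough for every lookup.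
-- NARROWING (stated): Pre_ demands a full n×n matrix although A reads only the entries its merge
-- sequence visits (B builds the whole matrix), so some ragged/undersized matrices on which A
-- happens to return are excluded — see the cite in claim.json ((1, [[0, 5]], 2)).
def Pre_agglomerative_clustering (k : Int) (matrix : List (List Int)) (n : Int) : Prop :=
  (n ≤ k ∨ (1 ≤ k ∧ n ≤ (matrix.length : Int) ∧ ∀ row ∈ matrix.take n.toNat, n ≤ (row.length : Int))) ∧
    (0 ≤ n ∨ 0 ≤ k)

instance (k : Int) (matrix : List (List Int)) (n : Int) : Decidable (Pre_agglomerative_clustering k matrix n) := by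
  unfold Pre_agglomerative_clustering; infer_instance

def pvWitness_agglomerative_clustering : Int × List (List Int) × Int := (1, [[0, 7], [7, 0]], 2)

def Spec_agglomerative_clustering (k : Int) (matrix : List (List Int)) (n : Int) (out : List (List Int)) : Prop := out = agglomerative_clustering_alt k matrix n
instance (k : Int) (matrix : List (List Int)) (n : Int) (out : List (List Int)) : Decidable (Spec_agglomerative_clustering k matrix n out) := by unfold Spec_agglomerative_clustering; infer_instance

-- ===== CLAIM (what is proved, stated in full; the proofs are below) =====
def Claim_equal_agglomerative_clustering : Prop := ∀ (k : Int) (matrix : List (List Int)) (n : Int), Dom_agglomerative_clustering k matrix n → Pre_agglomerative_clustering k matrix n → Spec_agglomerative_clustering k matrix n (agglomerative_clustering k matrix n)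

-- ===== LEMMAS AND PROOFS =====

lemma pvMax_append (l1 l2 : List Int) (h1 : l1 ≠ []) (h2 : l2 ≠ []) :
    (PySem.List.max? (l1 ++ l2) (fun y => y)).getD 0 =
      max ((PySem.List.max? l1 (fun y => y)).getD 0) ((PySem.List.max? l2 (fun y => y)).getD 0) := by
  obtain ⟨x1, t1, rfl⟩ := List.exists_cons_of_ne_nil h1
  obtain ⟨x2, t2, rfl⟩ := List.exists_cons_of_ne_nil h2
  simp only [List.cons_append, PySem.List.max?_id_cons, Option.getD_some, List.foldl_append,
    List.foldl_cons]
  exact List.foldl_assoc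

lemma pvCrossList_ne_nil (m : List (List Int)) (ci cj : List Int) (h1 : ci ≠ []) (h2 : cj ≠ []) :
    (ci.flatMap fun a => cj.map fun b => pvMget m a b) ≠ [] := by
  obtain ⟨x1, t1, rfl⟩ := List.exists_cons_of_ne_nil h1
  obtain ⟨x2, t2, rfl⟩ := List.exists_cons_of_ne_nil h2
  simp [List.flatMap_cons]

lemma pvCross_append_left (m : List (List Int)) (ci cj ck : List Int)
    (h1 : ci ≠ []) (h2 : cj ≠ []) (h3 : ck ≠ []) :
    pvCross m (ci ++ cj) ck = max (pvCross m ci ck) (pvCross m cj ck) := by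
  unfold pvCross
  rw [List.flatMap_append]
  exact pvMax_append _ _ (pvCrossList_ne_nil m ci ck h1 h3) (pvCrossList_ne_nil m cj ck h2 h3)

lemma pvCross_append_right (m : List (List Int)) (ck ci cj : List Int)
    (h1 : ck ≠ []) (h2 : ci ≠ []) (h3 : cj ≠ []) :
    pvCross m ck (ci ++ cj) = max (pvCross m ck ci) (pvCross m ck cj) := by
  induction ck with
  | nil => exact absurd rfl h1
  | cons x t ih =>
    cases t with
    | nil =>
      unfold pvCross
      simp only [List.flatMap_cons, List.flatMap_nil, List.append_nil, List.map_append]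
      exact pvMax_append _ _ (by simp [List.map_eq_nil_iff, h2])
        (by simp [List.map_eq_nil_iff, h3])
    | cons y s =>
      have hne : y :: s ≠ [] := by simp
      have hx : ∀ cs : List Int, cs ≠ [] → pvCross m (x :: y :: s) cs =
          max ((PySem.List.max? (cs.map fun b => pvMget m x b) (fun z => z)).getD 0)
            (pvCross m (y :: s) cs) := by
        intro cs hcs
        unfold pvCross
        rw [List.flatMap_cons]
        exact pvMax_append _ _ (by simp [List.map_eq_nil_iff, hcs])
          (pvCrossList_ne_nil m _ _ hne hcs)
      rw [hx _ (by simp [h2] : ci ++ cj ≠ []), ih hne, hx _ h2, hx _ h3, List.map_append,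
        pvMax_append _ _ (by simp [List.map_eq_nil_iff, h2])
          (by simp [List.map_eq_nil_iff, h3])]
      exact max_max_max_comm _ _ _ _

def pvInv (matrix ms D : List (List Int)) : Prop :=
  D.length = ms.length ∧ (∀ r ∈ D, r.length = ms.length) ∧ (∀ c ∈ ms, c ≠ []) ∧
  ∀ p q : Nat, p < ms.length → q < ms.length → p ≠ q →
    (D.getD p []).getD q 0 = pvCross matrix (ms.getD p []) (ms.getD q [])

lemma pvSelect_eq (matrix ms D : List (List Int)) (hInv : pvInv matrix ms D) :
    pvSelectA matrix ms = pvSelectB D (ms.length : Int) := by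
  obtain ⟨hlen, hrow, hne, hd⟩ := hInv
  unfold pvSelectA pvSelectB
  apply PySem.List.foldl_congr_mem
  intro acc p hp
  apply PySem.List.foldl_congr_mem
  intro acc' q hq
  rw [PySem.List.mem_pyRange_one] at hp hq
  have h1 : p.toNat < ms.length := by omega
  have h2 : q.toNat < ms.length := by omega
  rw [hd p.toNat q.toNat h1 h2 (by omega)]

def pvGood (L : Int) (st : Option Int × Int × Int) : Prop :=
  (∃ b, st.1 = some b) ∧ 0 ≤ st.2.1 ∧ st.2.1 < st.2.2 ∧ st.2.2 < L

lemma pvSelectB_good (D : List (List Int)) (L : Int) (hL : 2 ≤ L) :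
    pvGood L (pvSelectB D L) := by
  have hbody : ∀ (st : Option Int × Int × Int) (p q : Int), 0 ≤ p → p < q → q < L →
      pvGood L st → pvGood L
        ((fun st (q : Int) =>
          let cur := (D.getD p.toNat []).getD q.toNat 0
          match st.1 with
          | none => (some cur, p, q)
          | some b => if cur < b then (some cur, p, q) else st) st q) := by
    intro st p q hp hpq hq hg
    obtain ⟨⟨b, hb⟩, hg1, hg2, hg3⟩ := hg
    simp only [hb]
    split
    · exact ⟨⟨_, rfl⟩, hp, hpq, hq⟩
    · exact ⟨⟨b, hb⟩, hg1, hg2, hg3⟩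
  have hinner : ∀ (st : Option Int × Int × Int) (p a : Int), 0 ≤ p → p < a → pvGood L st →
      pvGood L ((PySem.List.pyRange a L 1).foldl (fun st (q : Int) =>
          let cur := (D.getD p.toNat []).getD q.toNat 0
          match st.1 with
          | none => (some cur, p, q)
          | some b => if cur < b then (some cur, p, q) else st) st) := by
    intro st p a hp hpa hg
    refine List.foldlRecOn _ _ hg ?_
    intro st' hg' q hq
    rw [PySem.List.mem_pyRange_one] at hq
    exact hbody st' p q hp (by omega) (by omega) hg'
  unfold pvSelectB
  rw [PySem.List.pyRange_one_cons (by omega : (0:Int) < L)]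
  rw [List.foldl_cons]
  have hfirst : pvGood L ((PySem.List.pyRange (0 + 1) L 1).foldl (fun st (q : Int) =>
      let cur := (D.getD (0:Int).toNat []).getD q.toNat 0
      match st.1 with
      | none => (some cur, (0:Int), q)
      | some b => if cur < b then (some cur, (0:Int), q) else st) ((none : Option Int), (0:Int), (1:Int))) := by
    rw [show (0:Int) + 1 = 1 by ring, PySem.List.pyRange_one_cons (by omega : (1:Int) < L),
      List.foldl_cons]
    exact hinner _ 0 2 (by omega) (by omega)
      ⟨⟨_, rfl⟩, le_refl (0:Int), by show (0:Int) < (1:Int); omega, by show (1:Int) < L; omega⟩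
  refine List.foldlRecOn _ _ hfirst ?_
  intro st' hg' p hp
  rw [PySem.List.mem_pyRange_one] at hp
  exact hinner st' p (p + 1) (by omega) (by omega) hg'

lemma pvStep_inv (matrix ms D : List (List Int)) (hInv : pvInv matrix ms D)
    (hL : 2 ≤ (ms.length : Int)) :
    (pvStepB ms D).1 = pvStepA matrix ms ∧ pvInv matrix (pvStepB ms D).1 (pvStepB ms D).2 ∧
      (pvStepB ms D).1.length + 1 = ms.length := by
  obtain ⟨hlen, hrow, hne, hd⟩ := hInv
  obtain ⟨⟨best, hbest⟩, h0i, hij, hjL⟩ := pvSelectB_good D (ms.length : Int) hL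
  set L := ms.length with hLdef
  set s := pvSelectB D (L : Int) with hs
  set i := s.2.1 with hi
  set j := s.2.2 with hj
  have hiN : i.toNat < L := by omega
  have hjN : j.toNat < L := by omega
  have hijN : i.toNat < j.toNat := by omega
  have hiI : (i.toNat : Int) = i := Int.toNat_of_nonneg h0i
  have hjI : (j.toNat : Int) = j := Int.toNat_of_nonneg (by omega)
  set mi := ms.getD i.toNat [] with hmi
  set mj := ms.getD j.toNat [] with hmj
  set keep := (PySem.List.pyRange 0 (D.length : Int) 1).filter (fun t => t != j) with hkeep
  set D' := keep.map (fun p => keep.map (fun q => pvMerged D i j p q)) with hD'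
  set ms' := (ms.set i.toNat (mi ++ mj)).eraseIdx j.toNat with hms'
  have hstep : pvStepB ms D = (ms', D') := rfl
  have hmem : ∀ x : Nat, x < L → ms.getD x [] ∈ ms := by
    intro x hx
    rw [List.getD_eq_getElem _ _ hx]
    exact List.getElem_mem _
  have hne' : ∀ x : Nat, x < L → ms.getD x [] ≠ [] := fun x hx => hne _ (hmem x hx)
  have hms'len : ms'.length = L - 1 := by
    rw [hms', List.length_eraseIdx]
    simp only [List.length_set]
    rw [if_pos hjN, hLdef]
  have hkeepeq : keep = PySem.List.pyRange 0 j 1 ++ PySem.List.pyRange (j + 1) (L : Int) 1 := by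
    rw [hkeep, hlen, PySem.List.pyRange_one_append 0 j (L : Int) (by omega) (by omega),
      List.filter_append]
    congr 1
    · rw [List.filter_eq_self]
      intro x hx
      rw [PySem.List.mem_pyRange_one] at hx
      simp only [bne_iff_ne, ne_eq]
      omega
    · rw [PySem.List.pyRange_one_cons hjL, List.filter_cons]
      simp only [bne_self_eq_false, Bool.false_eq_true, if_false]
      rw [List.filter_eq_self]
      intro x hx
      rw [PySem.List.mem_pyRange_one] at hx
      simp only [bne_iff_ne, ne_eq]
      omega
  have hkeeplen : keep.length = L - 1 := by
    rw [hkeepeq]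
    simp only [List.length_append, PySem.List.length_pyRange_one]
    omega
  have hkeepget : ∀ p' : Nat, p' < L - 1 →
      keep.getD p' 0 = (if p' < j.toNat then (p' : Int) else (p' + 1 : Int)) := by
    intro p' hp'
    rw [List.getD_eq_getElem _ _ (by rw [hkeeplen]; exact hp')]
    have hlen1 : (PySem.List.pyRange 0 j 1).length = j.toNat := by
      rw [PySem.List.length_pyRange_one]; omega
    rcases Nat.lt_or_ge p' j.toNat with hc | hc
    · have hb : p' < (PySem.List.pyRange 0 j 1).length := by omega
      rw [if_pos hc, List.getElem_of_eq hkeepeq, List.getElem_append, dif_pos hb,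
        PySem.List.getElem_pyRange_one]
      omega
    · have hb : ¬ p' < (PySem.List.pyRange 0 j 1).length := by omega
      rw [if_neg (by omega), List.getElem_of_eq hkeepeq, List.getElem_append, dif_neg hb,
        PySem.List.getElem_pyRange_one]
      omega
  have hms'get : ∀ p' : Nat, p' < L - 1 →
      ms'.getD p' [] = (if p' < j.toNat then (if p' = i.toNat then mi ++ mj else ms.getD p' [])
        else ms.getD (p' + 1) []) := by
    intro p' hp'
    rw [List.getD_eq_getElem _ _ (by rw [hms'len]; exact hp')]
    rw [List.getElem_of_eq hms', List.getElem_eraseIdx]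
    rcases Nat.lt_or_ge p' j.toNat with hc | hc
    · rw [dif_pos hc, if_pos hc, List.getElem_set]
      by_cases hpi : p' = i.toNat
      · rw [if_pos hpi.symm, if_pos hpi]
      · rw [if_neg (fun h => hpi h.symm), if_neg hpi,
          List.getD_eq_getElem _ _ (by omega : p' < ms.length)]
    · rw [dif_neg (by omega), if_neg (by omega), List.getElem_set,
        if_neg (by omega), List.getD_eq_getElem _ _ (by omega : p' + 1 < ms.length)]
  have hD'get : ∀ p' q' : Nat, p' < L - 1 → q' < L - 1 →
      (D'.getD p' []).getD q' 0 = pvMerged D i j (keep.getD p' 0) (keep.getD q' 0) := by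
    intro p' q' hp' hq'
    have hp'' : p' < keep.length := by omega
    have hq'' : q' < keep.length := by omega
    have hpD : p' < D'.length := by rw [hD', List.length_map]; exact hp''
    rw [List.getD_eq_getElem D' [] hpD, List.getElem_of_eq hD', List.getElem_map]
    have hqrow : q' < (List.map (fun q => pvMerged D i j keep[p'] q) keep).length := by
      rw [List.length_map]; exact hq''
    rw [List.getD_eq_getElem keep 0 hp'', List.getD_eq_getElem keep 0 hq'',
      List.getD_eq_getElem _ 0 hqrow, List.getElem_map]
  refine ⟨?_, ?_, ?_⟩
  · rw [hstep]
    show ms' = pvStepA matrix ms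
    rw [pvStepA, pvSelect_eq matrix ms D ⟨hlen, hrow, hne, hd⟩]
  · rw [hstep]
    refine ⟨by rw [hD', List.length_map, hkeeplen, hms'len], ?_, ?_, ?_⟩
    · intro r hr
      obtain ⟨x, hx, rfl⟩ := List.mem_map.mp hr
      rw [List.length_map, hkeeplen, hms'len]
    · intro c hc
      obtain ⟨p', hp', hceq⟩ := List.mem_iff_getElem.mp hc
      have hpL : p' < ms'.length := hp'
      have hp0 : p' < L - 1 := by omega
      have : ms'.getD p' [] = c := by rw [List.getD_eq_getElem _ _ hp', hceq]
      rw [← this, hms'get p' hp0]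
      split
      · split
        · exact fun h => (hne' _ hiN) (List.append_eq_nil_iff.mp h).1
        · exact hne' _ (by omega)
      · exact hne' _ (by omega)
    · intro p q hp hq hpq
      simp only [hms'len] at *
      have hp1 : p < L - 1 := by simpa [hms'len] using hp
      have hq1 : q < L - 1 := by simpa [hms'len] using hq
      have hmerged : ∀ a b : Nat, a < L → b < L → a ≠ b → a ≠ j.toNat → b ≠ j.toNat →
          pvMerged D i j (a : Int) (b : Int) =
            pvCross matrix (if a = i.toNat then mi ++ mj else ms.getD a [])
              (if b = i.toNat then mi ++ mj else ms.getD b []) := by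
        intro a b ha hb hab haj hbj
        by_cases hai : a = i.toNat
        · have hbi : b ≠ i.toNat := fun h => hab (hai.trans h.symm)
          rw [pvMerged, if_pos ⟨by rw [← hiI, hai], by rw [← hiI]; exact_mod_cast hbi⟩]
          simp only [Int.toNat_natCast]
          rw [hd i.toNat b hiN hb (fun h => hbi h.symm), hd j.toNat b hjN hb (fun h => hbj h.symm),
            if_pos hai, if_neg hbi]
          exact (pvCross_append_left matrix mi mj _ (hne' _ hiN) (hne' _ hjN) (hne' _ hb)).symm
        · by_cases hbi : b = i.toNat
          · rw [pvMerged, if_neg (fun h => hai (by exact_mod_cast hiI ▸ h.1)),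
              if_pos ⟨by rw [← hiI, hbi], by rw [← hiI]; exact_mod_cast hai⟩]
            simp only [Int.toNat_natCast]
            rw [hd a i.toNat ha hiN hai, hd a j.toNat ha hjN haj, if_neg hai, if_pos hbi]
            exact (pvCross_append_right matrix _ mi mj (hne' _ ha) (hne' _ hiN) (hne' _ hjN)).symm
          · rw [pvMerged, if_neg (fun h => hai (by exact_mod_cast hiI ▸ h.1)),
              if_neg (fun h => hbi (by exact_mod_cast hiI ▸ h.1))]
            simp only [Int.toNat_natCast]
            rw [hd a b ha hb hab, if_neg hai, if_neg hbi]
      rw [hD'get p q hp1 hq1, hkeepget p hp1, hkeepget q hq1, hms'get p hp1, hms'get q hq1]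
      have hargp : (if p < j.toNat then (p : Int) else (p + 1 : Int)) =
          (((if p < j.toNat then p else p + 1 : Nat)) : Int) := by split <;> push_cast <;> ring
      have hargq : (if q < j.toNat then (q : Int) else (q + 1 : Int)) =
          (((if q < j.toNat then q else q + 1 : Nat)) : Int) := by split <;> push_cast <;> ring
      rw [hargp, hargq,
        hmerged _ _ (by split <;> omega) (by split <;> omega)
          (by split <;> split <;> omega) (by split <;> omega) (by split <;> omega)]
      have hpci : ¬ p < j.toNat → ¬ (p + 1 = i.toNat) := by omega
      have hqci : ¬ q < j.toNat → ¬ (q + 1 = i.toNat) := by omega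
      congr 1 <;> split_ifs <;> first | rfl | omega
  · rw [hstep]
    show ms'.length + 1 = L
    omega

lemma pvLoop_eq (matrix : List (List Int)) (k : Int) (f : Nat) (ms D : List (List Int))
    (hInv : pvInv matrix ms D) (hk : 1 ≤ k ∨ (ms.length : Int) ≤ k) :
    pvLoopA matrix k f ms = pvLoopB k f ms D := by
  induction f generalizing ms D with
  | zero => rfl
  | succ f ih =>
    rw [pvLoopA, pvLoopB]
    by_cases hc : k < (ms.length : Int)
    · rw [if_pos hc, if_pos hc]
      have hk1 : 1 ≤ k := by rcases hk with h | h; exact h; omega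
      obtain ⟨heq, hinv', hlen'⟩ := pvStep_inv matrix ms D hInv (by omega)
      rw [← heq]
      exact ih _ _ hinv' (Or.inl hk1)
    · rw [if_neg hc, if_neg hc]

lemma pvLoopA_stop (matrix : List (List Int)) (k : Int) (f : Nat) (ms : List (List Int))
    (h : ¬ k < (ms.length : Int)) : pvLoopA matrix k f ms = ms := by
  cases f with
  | zero => rfl
  | succ f => rw [pvLoopA, if_neg h]

lemma pvInit_inv (matrix : List (List Int)) (n : Int) :
    pvInv matrix ((PySem.List.pyRange 0 n 1).map (fun i => [i]))
      ((PySem.List.pyRange 0 n 1).map (fun a => (PySem.List.pyRange 0 n 1).map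
        (fun b => pvMget matrix a b))) := by
  refine ⟨by simp, ?_, ?_, ?_⟩
  · intro r hr
    obtain ⟨x, hx, rfl⟩ := List.mem_map.mp hr
    simp
  · intro c hc
    obtain ⟨x, hx, rfl⟩ := List.mem_map.mp hc
    simp
  · intro p q hp hq hpq
    simp only [List.length_map] at hp hq
    rw [List.getD_eq_getElem _ [] (by rw [List.length_map]; exact hp), List.getElem_map,
      List.getD_eq_getElem _ 0 (by rw [List.length_map]; exact hq), List.getElem_map,
      List.getD_eq_getElem _ ([] : List Int) (by rw [List.length_map]; exact hp), List.getElem_map,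
      List.getD_eq_getElem _ ([] : List Int) (by rw [List.length_map]; exact hq), List.getElem_map]
    simp [pvCross, List.flatMap_cons, PySem.List.max?_id_cons]

-- ===== VERDICT (by name: the statement is the Claim_ definition above) =====
theorem agglomerative_clustering_spec : Claim_equal_agglomerative_clustering := by
  unfold Claim_equal_agglomerative_clustering
  intro k matrix n hdom hpre
  obtain ⟨hk2, hn⟩ := hpre
  have hk : n ≤ k ∨ 1 ≤ k := hk2.imp id (fun h => h.1)
  unfold Spec_agglomerative_clustering agglomerative_clustering agglomerative_clustering_alt
  by_cases hstop :
      ((((PySem.List.pyRange 0 n 1).map (fun i => ([i] : List Int))).length : Int)) ≤ k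
  · rw [if_pos hstop, pvLoopA_stop matrix k n.toNat _ (by omega)]
  · rw [if_neg hstop]
    refine pvLoop_eq matrix k n.toNat _ _ (pvInit_inv matrix n) ?_
    rcases hk with h | h
    · rcases hn with h0 | h0 <;>
        (right; simp only [List.length_map, PySem.List.length_pyRange_one]; omega)
    · exact Or.inl h
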